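-- pv_equiv track=rewrite | github.com/Luoxiaogan/Learn_coding | Learn_python/CS61A/hws/hw03/hw03.py | missing_digits
-- ===== SOURCE A (Python) =====
-- def missing_digits(n):
--     """Given a number a that is in sorted, increasing order,
--     return the number of missing digits in n. A missing digit is
--     a number between the first and last digit of a that is not in n.
--     >>> missing_digits(1248) # 3, 5, 6, 7
--     4
--     >>> missing_digits(1122) # No missing numbers
--     0
--     >>> missing_digits(123456) # No missing numbers
--     0
--     >>> missing_digits(3558) # 4, 6, 7
--     3
--     >>> missing_digits(35578) # 4, 6
--     2
--     >>> missing_digits(12456) # 3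
--     1
--     >>> missing_digits(16789) # 2, 3, 4, 5
--     4
--     >>> missing_digits(19) # 2, 3, 4, 5, 6, 7, 8
--     7
--     >>> missing_digits(4) # No missing numbers between 4 and 4
--     0
--     >>> from construct_check import check
--     >>> # ban while or for loops
--     >>> check(HW_SOURCE_FILE, 'missing_digits', ['While', 'For'])
--     True
--     """
--     "*** YOUR CODE HERE ***"
--     #必须使用递归来做(recursive method)
--     #思路：从最后一项n%10开始往下减
--     if n<10:
--         return 0
--     else:
--         if n%10==(n//10)%10:
--             return 0+missing_digits(n//10)
--         else:
--             return n%10-(n//10)%10-1+missing_digits(n//10)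
-- ===== SOURCE B (Python) =====
-- def missing_digits(n):
--     total = 0
--     while n >= 10:
--         d = n % 10
--         prev = (n // 10) % 10
--         if d != prev:
--             total += d - prev - 1
--         n //= 10
--     return total
-- ===== Notes on version B (the rewrite author's own statement) =====
-- stated objective: idiomatic
-- what changed: Replaces the non-tail recursion (which sums after each recursive call returns) with an explicit iterative while-loop over the digits carrying a running total accumulator.
import Mathlib
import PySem

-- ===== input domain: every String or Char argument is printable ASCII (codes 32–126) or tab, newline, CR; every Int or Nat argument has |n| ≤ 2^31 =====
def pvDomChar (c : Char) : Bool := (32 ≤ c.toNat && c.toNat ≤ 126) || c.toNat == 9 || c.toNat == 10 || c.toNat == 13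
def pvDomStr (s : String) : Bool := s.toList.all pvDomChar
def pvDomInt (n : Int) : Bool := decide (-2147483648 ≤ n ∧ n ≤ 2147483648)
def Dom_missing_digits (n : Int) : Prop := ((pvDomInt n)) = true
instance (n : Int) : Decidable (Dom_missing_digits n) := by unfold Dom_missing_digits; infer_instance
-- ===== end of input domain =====

-- B replaces A's non-tail recursion by an iterative accumulator loop over the digits (same values; objective: idiomatic).


-- ===== PORT A =====
def missing_digits (n : Int) : Int :=
  if n < 10 then 0
  else
    if PySem.Int.mod n 10 = PySem.Int.mod (PySem.Int.floordiv n 10) 10 then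
      0 + missing_digits (PySem.Int.floordiv n 10)
    else
      PySem.Int.mod n 10 - PySem.Int.mod (PySem.Int.floordiv n 10) 10 - 1
        + missing_digits (PySem.Int.floordiv n 10)
termination_by n.toNat
decreasing_by
  all_goals
    rw [PySem.Int.floordiv_eq_ediv_of_pos (by norm_num)]
    omega

-- ===== PORT B =====
-- the while-loop of Source B, as a tail-recursive function over the loop state (n, total)
def mdLoop (n : Int) (total : Int) : Int :=
  if 10 ≤ n then
    let d := PySem.Int.mod n 10
    let prev := PySem.Int.mod (PySem.Int.floordiv n 10) 10
    mdLoop (PySem.Int.floordiv n 10) (if d ≠ prev then total + (d - prev - 1) else total)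
  else total
termination_by n.toNat
decreasing_by
  rw [PySem.Int.floordiv_eq_ediv_of_pos (by norm_num)]
  omega

def missing_digits_alt (n : Int) : Int := mdLoop n 0

-- ===== PRECONDITION & SPEC =====
def Spec_missing_digits (n : Int) (out : Int) : Prop := out = missing_digits_alt n
instance (n : Int) (out : Int) : Decidable (Spec_missing_digits n out) := by unfold Spec_missing_digits; infer_instance

-- ===== CLAIM (what is proved, stated in full; the proofs are below) =====
def Claim_equal_missing_digits : Prop := ∀ (n : Int), Dom_missing_digits n → Spec_missing_digits n (missing_digits n)

-- ===== LEMMAS AND PROOFS =====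
-- loop invariant: the loop adds missing_digits n to the running total
theorem mdLoop_eq (n total : Int) : mdLoop n total = total + missing_digits n := by
  by_cases h : 10 ≤ n
  · have hrec : mdLoop (PySem.Int.floordiv n 10) _ = _ :=
      mdLoop_eq (PySem.Int.floordiv n 10)
        (if PySem.Int.mod n 10 ≠ PySem.Int.mod (PySem.Int.floordiv n 10) 10 then
          total + (PySem.Int.mod n 10 - PySem.Int.mod (PySem.Int.floordiv n 10) 10 - 1) else total)
    rw [mdLoop, missing_digits]
    simp only [h, if_pos, show ¬ n < 10 by omega, if_neg, not_false_iff]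
    rw [hrec]
    split_ifs with h1 h2 <;> try ring
    exact absurd (not_not.mp h1) h2
  · rw [mdLoop, missing_digits]
    simp only [h, if_neg, not_false_iff, show n < 10 by omega, if_pos]
    ring
termination_by n.toNat
decreasing_by
  rw [PySem.Int.floordiv_eq_ediv_of_pos (by norm_num)]
  omega

-- ===== VERDICT (by name: the statement is the Claim_ definition above) =====
theorem missing_digits_spec : Claim_equal_missing_digits := by
  intro n _
  unfold Spec_missing_digits missing_digits_alt
  rw [mdLoop_eq]
  ring
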